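-- pv_equiv track=rewrite | github.com/johnny536/CodePractice | longestBalancedSub.py | wrongLongestBalanced
-- ===== SOURCE A (Python) =====
-- from typing import List
--
-- def wrongLongestBalanced(nums: List[int]) -> int:
--     oddS = []
--     evenS = []
--     n = len(nums)
--     longest = 0
--     #accumulated = 0
--     for i in range(n):
--         if nums[i] % 2 == 0:
--             evenS.append(nums[i])
--         else:
--             oddS.append(nums[i])
--         if len(set(evenS)) == len(set(oddS)):
--             if longest < i+1:
--                 longest = i+1
--
--     if longest == n:
--         return n
--
--     for j in range(n):
--         if nums[j] % 2 == 0: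
--             evenS.remove(nums[j])
--         else:
--             oddS.remove(nums[j])
--         if len(set(evenS)) == len(set(oddS)):
--             if longest < n-j-1:
--                 longest = n-j-1
--
--     return longest
-- ===== SOURCE B (Python) =====
-- from typing import List
--
-- def _add(x, ce, co, de, do):
--     # count one more occurrence of x; return updated distinct counts
--     if x % 2 == 0:
--         c = ce.get(x, 0)
--         ce[x] = c + 1
--         if c == 0:
--             de += 1
--     else:
--         c = co.get(x, 0)
--         co[x] = c + 1
--         if c == 0:
--             do += 1
--     return de, do
--
-- def wrongLongestBalanced(nums: List[int]) -> int:
--     longest = 0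
--     ce, co, de, do = {}, {}, 0, 0
--     for i, x in enumerate(nums):
--         de, do = _add(x, ce, co, de, do)
--         if de == do and longest < i + 1:
--             longest = i + 1
--     ce, co, de, do = {}, {}, 0, 0
--     for m, x in enumerate(reversed(nums)):
--         de, do = _add(x, ce, co, de, do)
--         if de == do and longest < m + 1:
--             longest = m + 1
--     return longest
-- ===== Notes on version B (the rewrite author's own statement) =====
-- stated objective: faster
-- what changed: B replaces A's per-step rebuilding of set(evenS)/set(oddS) (and list.remove scans) by two single passes (left-to-right over prefixes, right-to-left over suffixes) that maintain occurrence-count dicts and the two distinct counts incrementally.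
import Mathlib
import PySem

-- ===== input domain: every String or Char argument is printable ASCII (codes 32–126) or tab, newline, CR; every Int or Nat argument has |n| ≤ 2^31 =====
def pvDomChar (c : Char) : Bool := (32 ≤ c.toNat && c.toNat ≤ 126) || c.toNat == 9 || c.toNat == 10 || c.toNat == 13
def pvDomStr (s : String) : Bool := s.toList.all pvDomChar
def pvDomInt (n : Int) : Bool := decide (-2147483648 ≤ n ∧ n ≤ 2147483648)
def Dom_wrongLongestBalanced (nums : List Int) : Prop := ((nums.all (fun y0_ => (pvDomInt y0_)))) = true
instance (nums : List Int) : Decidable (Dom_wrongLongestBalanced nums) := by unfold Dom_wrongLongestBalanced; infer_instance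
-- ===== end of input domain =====

-- B replaces A's per-step set(...) rebuilding / list.remove scans by two linear passes that keep
-- occurrence-count dicts and the distinct-even/odd counts incrementally (measured asymptotically faster).
-- (A mutates no caller-visible state apart from its locals; equivalence is about the return value.)


-- ===== PORT A =====
def wrongLongestBalanced (nums : List Int) : Int :=
  let n : Int := (nums.length : Int)
  let s1 := (PySem.List.pyRange 0 n 1).foldl
    (fun (st : List Int × List Int × Int) i =>
      let x := PySem.List.pyGetD nums i 0
      let st1 : List Int × List Int × Int :=
        if PySem.Int.mod x 2 = 0 then (st.1 ++ [x], st.2.1, st.2.2)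
        else (st.1, st.2.1 ++ [x], st.2.2)
      if PySem.Set.len (PySem.Set.ofList st1.1) = PySem.Set.len (PySem.Set.ofList st1.2.1) then
        if st1.2.2 < i + 1 then (st1.1, st1.2.1, i + 1) else st1
      else st1)
    ([], [], 0)
  if s1.2.2 = n then n
  else
    -- list.remove(v): v is provably always present here, so the `none` branch of remove? is dead
    let s2 := (PySem.List.pyRange 0 n 1).foldl
      (fun (st : List Int × List Int × Int) j =>
        let x := PySem.List.pyGetD nums j 0
        let st1 : List Int × List Int × Int :=
          if PySem.Int.mod x 2 = 0 then ((PySem.List.remove? st.1 x).getD st.1, st.2.1, st.2.2)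
          else (st.1, (PySem.List.remove? st.2.1 x).getD st.2.1, st.2.2)
        if PySem.Set.len (PySem.Set.ofList st1.1) = PySem.Set.len (PySem.Set.ofList st1.2.1) then
          if st1.2.2 < n - j - 1 then (st1.1, st1.2.1, n - j - 1) else st1
        else st1)
      s1
    s2.2.2

-- ===== PORT B =====
-- helper `_add` of Source B: counts one occurrence of x, returns updated (ce, co, de, do)
def pvAdd (x : Int) (cs : PySem.Dict Int Int × PySem.Dict Int Int × Int × Int) :
    PySem.Dict Int Int × PySem.Dict Int Int × Int × Int :=
  if PySem.Int.mod x 2 = 0 then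
    let c := cs.1.getD x 0
    (cs.1.insert x (c + 1), cs.2.1, if c = 0 then cs.2.2.1 + 1 else cs.2.2.1, cs.2.2.2)
  else
    let c := cs.2.1.getD x 0
    (cs.1, cs.2.1.insert x (c + 1), cs.2.2.1, if c = 0 then cs.2.2.2 + 1 else cs.2.2.2)

def wrongLongestBalanced_alt (nums : List Int) : Int :=
  let p1 := (PySem.List.enumerate nums).foldl
    (fun (st : (PySem.Dict Int Int × PySem.Dict Int Int × Int × Int) × Int) p =>
      let cs := pvAdd p.2 st.1
      if cs.2.2.1 = cs.2.2.2 ∧ st.2 < p.1 + 1 then (cs, p.1 + 1) else (cs, st.2))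
    ((PySem.Dict.empty, PySem.Dict.empty, 0, 0), 0)
  let p2 := (PySem.List.enumerate nums.reverse).foldl
    (fun (st : (PySem.Dict Int Int × PySem.Dict Int Int × Int × Int) × Int) p =>
      let cs := pvAdd p.2 st.1
      if cs.2.2.1 = cs.2.2.2 ∧ st.2 < p.1 + 1 then (cs, p.1 + 1) else (cs, st.2))
    ((PySem.Dict.empty, PySem.Dict.empty, 0, 0), p1.2)
  p2.2

-- ===== PRECONDITION & SPEC =====
def Spec_wrongLongestBalanced (nums : List Int) (out : Int) : Prop := out = wrongLongestBalanced_alt nums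
instance (nums : List Int) (out : Int) : Decidable (Spec_wrongLongestBalanced nums out) := by unfold Spec_wrongLongestBalanced; infer_instance

-- ===== CLAIM (what is proved, stated in full; the proofs are below) =====
def Claim_equal_wrongLongestBalanced : Prop := ∀ (nums : List Int), Dom_wrongLongestBalanced nums → Spec_wrongLongestBalanced nums (wrongLongestBalanced nums)

-- ===== LEMMAS AND PROOFS =====

-- proof-side vocabulary
def pvEvens (l : List Int) : List Int := l.filter (fun x => decide (PySem.Int.mod x 2 = 0))
def pvOdds (l : List Int) : List Int := l.filter (fun x => !decide (PySem.Int.mod x 2 = 0))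
def pvD (l : List Int) : Int := PySem.Set.len (PySem.Set.ofList l)
def pvBal (l : List Int) : Bool := decide (pvD (pvEvens l) = pvD (pvOdds l))
def pvF (acc : Int) (cs : List (Bool × Int)) : Int :=
  cs.foldl (fun a c => if c.1 then max a c.2 else a) acc
def pvCP (l : List Int) : List (Bool × Int) :=
  (List.range l.length).map (fun m => (pvBal (l.take (m + 1)), ((m : Int) + 1)))
def pvCS : List Int → List (Bool × Int)
  | [] => []
  | _ :: t => (pvBal t, (t.length : Int)) :: pvCS t

-- named copies of the ports' loop bodies (definitionally equal to the inline lambdas)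
def pvAStep1 (nums : List Int) (st : List Int × List Int × Int) (i : Int) : List Int × List Int × Int :=
  let x := PySem.List.pyGetD nums i 0
  let st1 : List Int × List Int × Int :=
    if PySem.Int.mod x 2 = 0 then (st.1 ++ [x], st.2.1, st.2.2)
    else (st.1, st.2.1 ++ [x], st.2.2)
  if PySem.Set.len (PySem.Set.ofList st1.1) = PySem.Set.len (PySem.Set.ofList st1.2.1) then
    if st1.2.2 < i + 1 then (st1.1, st1.2.1, i + 1) else st1
  else st1

def pvAStepE (st : List Int × List Int × Int) (p : Int × Int) : List Int × List Int × Int :=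
  let st1 : List Int × List Int × Int :=
    if PySem.Int.mod p.2 2 = 0 then (st.1 ++ [p.2], st.2.1, st.2.2)
    else (st.1, st.2.1 ++ [p.2], st.2.2)
  if PySem.Set.len (PySem.Set.ofList st1.1) = PySem.Set.len (PySem.Set.ofList st1.2.1) then
    if st1.2.2 < p.1 + 1 then (st1.1, st1.2.1, p.1 + 1) else st1
  else st1

def pvASufE (n : Int) (st : List Int × List Int × Int) (p : Int × Int) : List Int × List Int × Int :=
  let st1 : List Int × List Int × Int :=
    if PySem.Int.mod p.2 2 = 0 then ((PySem.List.remove? st.1 p.2).getD st.1, st.2.1, st.2.2)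
    else (st.1, (PySem.List.remove? st.2.1 p.2).getD st.2.1, st.2.2)
  if PySem.Set.len (PySem.Set.ofList st1.1) = PySem.Set.len (PySem.Set.ofList st1.2.1) then
    if st1.2.2 < n - p.1 - 1 then (st1.1, st1.2.1, n - p.1 - 1) else st1
  else st1

def pvBStep (st : (PySem.Dict Int Int × PySem.Dict Int Int × Int × Int) × Int) (p : Int × Int) :
    (PySem.Dict Int Int × PySem.Dict Int Int × Int × Int) × Int :=
  let cs := pvAdd p.2 st.1
  if cs.2.2.1 = cs.2.2.2 ∧ st.2 < p.1 + 1 then (cs, p.1 + 1) else (cs, st.2)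

-- pvD facts
theorem pvD_perm {l l' : List Int} (h : l.Perm l') : pvD l = pvD l' := by
  unfold pvD
  have h1 := PySem.Set.nodup_ofList (α := Int) l
  have h2 := PySem.Set.nodup_ofList (α := Int) l'
  have hp : (PySem.Set.ofList l).Perm (PySem.Set.ofList l') := by
    rw [List.perm_ext_iff_of_nodup h1 h2]
    intro a
    simp [PySem.Set.mem_ofList, h.mem_iff]
  simp [PySem.Set.len, hp.length_eq]
theorem pvD_append (l : List Int) (x : Int) :
    pvD (l ++ [x]) = if x ∈ l then pvD l else pvD l + 1 := by
  unfold pvD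
  rw [PySem.Set.ofList_append_singleton, PySem.Set.add_eq_ite]
  by_cases h : x ∈ PySem.Set.ofList l
  · rw [if_pos h, if_pos (by simpa [PySem.Set.mem_ofList] using h)]
  · rw [if_neg h, if_neg (by simpa [PySem.Set.mem_ofList] using h)]
    simp [PySem.Set.len]

-- pvF facts
theorem pvF_append (acc : Int) (l l' : List (Bool × Int)) :
    pvF acc (l ++ l') = pvF (pvF acc l) l' := by
  simp [pvF, List.foldl_append]
theorem pvF_singleton (acc : Int) (c : Bool × Int) :
    pvF acc [c] = if c.1 then max acc c.2 else acc := rfl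
theorem pvF_mono (acc : Int) (l : List (Bool × Int)) : acc ≤ pvF acc l := by
  induction l generalizing acc with
  | nil => simp [pvF]
  | cons c t ih =>
    refine le_trans ?_ (ih (if c.1 then max acc c.2 else acc))
    split <;> simp
theorem pvF_ub {B acc : Int} {l : List (Bool × Int)} (h : acc ≤ B)
    (h2 : ∀ c ∈ l, c.1 = true → c.2 ≤ B) : pvF acc l ≤ B := by
  induction l generalizing acc with
  | nil => simpa [pvF] using h
  | cons c t ih =>
    refine ih ?_ (fun c hc => h2 c (List.mem_cons_of_mem _ hc))
    rcases hc1 : c.1 with _ | _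
    · simpa [hc1] using h
    · simp only [hc1, if_true]
      exact max_le h (h2 c List.mem_cons_self hc1)
theorem pvF_mem_le {v acc : Int} {l : List (Bool × Int)} (h : (true, v) ∈ l) : v ≤ pvF acc l := by
  induction l generalizing acc with
  | nil => simp at h
  | cons c t ih =>
    rcases List.mem_cons.1 h with h1 | h1
    · subst h1
      exact le_trans (le_max_right acc v) (pvF_mono _ _)
    · exact ih h1
theorem pvF_comm (acc : Int) (c : Bool × Int) (l : List (Bool × Int)) :
    pvF (if c.1 then max acc c.2 else acc) l = if c.1 then max (pvF acc l) c.2 else pvF acc l := by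
  induction l generalizing acc with
  | nil => simp [pvF]
  | cons d t ih =>
    have unf : ∀ a, pvF a (d :: t) = pvF (if d.1 then max a d.2 else a) t := fun a => rfl
    have hswap : (if d.1 then max (if c.1 then max acc c.2 else acc) d.2
                  else if c.1 then max acc c.2 else acc)
        = (if c.1 then max (if d.1 then max acc d.2 else acc) c.2
           else if d.1 then max acc d.2 else acc) := by
      split_ifs <;> first | rfl | rw [max_right_comm]
    rw [unf, hswap, ih, unf]

-- candidate-list facts
theorem pvCP_append (ys : List Int) (x : Int) :
    pvCP (ys ++ [x]) = pvCP ys ++ [(pvBal (ys ++ [x]), (ys.length : Int) + 1)] := by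
  unfold pvCP
  rw [List.length_append, List.length_singleton, List.range_succ, List.map_append]
  congr 1
  · apply List.map_congr_left
    intro m hm
    rw [List.mem_range] at hm
    rw [List.take_append_of_le_length (by omega)]
  · simp only [List.map_cons, List.map_nil]
    rw [List.take_of_length_le (by simp)]
theorem pvCP_val_le (l : List Int) : ∀ c ∈ pvCP l, c.1 = true → c.2 ≤ (l.length : Int) := by
  intro c hc _
  unfold pvCP at hc
  rw [List.mem_map] at hc
  obtain ⟨m, hm, rfl⟩ := hc
  rw [List.mem_range] at hm
  simp only
  omega
theorem pvCS_val_le (l : List Int) : ∀ c ∈ pvCS l, c.1 = true → c.2 ≤ (l.length : Int) := by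
  induction l with
  | nil => simp [pvCS]
  | cons x t ih =>
    intro c hc hct
    rw [pvCS, List.mem_cons] at hc
    rcases hc with rfl | hc
    · simp only [List.length_cons]
      omega
    · have := ih c hc hct
      simp only [List.length_cons]
      omega
theorem pvBal_perm {l l' : List Int} (h : l.Perm l') : pvBal l = pvBal l' := by
  unfold pvBal
  unfold pvEvens pvOdds
  rw [pvD_perm (h.filter _), pvD_perm (h.filter _)]

-- the two suffix candidate lists compute the same running max
theorem pvSuffix_eq (l : List Int) (acc : Int) (h : 0 ≤ acc) :
    pvF acc (pvCS l ++ [(pvBal l, (l.length : Int))]) = pvF acc (pvCP l.reverse) := by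
  induction l generalizing acc with
  | nil =>
    show pvF acc [(pvBal [], 0)] = pvF acc (pvCP [])
    have hb : pvBal [] = true := by decide
    rw [pvF_singleton, hb, if_pos rfl, max_eq_left h]
    rfl
  | cons x t ih =>
    have hrev : (x :: t).reverse = t.reverse ++ [x] := by simp
    have hbal : pvBal (t.reverse ++ [x]) = pvBal (x :: t) :=
      pvBal_perm ((List.perm_append_singleton x t.reverse).trans (List.Perm.cons x (List.reverse_perm t)))
    rw [hrev, pvCP_append, hbal]
    have hlen : ((t.reverse.length : Int) + 1) = ((x :: t).length : Int) := by simp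
    rw [hlen]
    set cl : Bool × Int := (pvBal (x :: t), ((x :: t).length : Int)) with hcl
    set ct : Bool × Int := (pvBal t, (t.length : Int)) with hct
    have hL : pvCS (x :: t) ++ [cl] = ct :: (pvCS t ++ [cl]) := rfl
    have unf : ∀ (a : Int) (cs : List (Bool × Int)), pvF a (ct :: cs) = pvF (if ct.1 then max a ct.2 else a) cs := fun a cs => rfl
    rw [hL, unf, pvF_append, pvF_append, pvF_comm acc ct (pvCS t),
        ← pvF_singleton (pvF acc (pvCS t)) ct,
        show pvF (pvF acc (pvCS t)) [ct] = pvF acc (pvCS t ++ [ct]) from (pvF_append acc (pvCS t) [ct]).symm,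
        ih acc h]

-- A's prefix loop
theorem pvAStepE_eq (E O : List Int) (L i x : Int) :
    pvAStepE (E, O, L) (i, x) =
      if PySem.Int.mod x 2 = 0 then
        (E ++ [x], O, if pvD (E ++ [x]) = pvD O then max L (i + 1) else L)
      else
        (E, O ++ [x], if pvD E = pvD (O ++ [x]) then max L (i + 1) else L) := by
  by_cases h1 : PySem.Int.mod x 2 = 0
  · by_cases h2 : pvD (E ++ [x]) = pvD O
    · simp only [pvAStepE, pvD] at *
      rw [if_pos h1, if_pos h1, if_pos h2]
      split_ifs with h3
      · rw [max_eq_right (le_of_lt h3)]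
      · rw [max_eq_left (not_lt.1 h3)]
    · simp only [pvAStepE, pvD] at *
      rw [if_pos h1, if_pos h1]
      simp only [if_neg h2]
  · by_cases h2 : pvD E = pvD (O ++ [x])
    · simp only [pvAStepE, pvD] at *
      rw [if_neg h1, if_neg h1, if_pos h2]
      split_ifs with h3
      · rw [max_eq_right (le_of_lt h3)]
      · rw [max_eq_left (not_lt.1 h3)]
    · simp only [pvAStepE, pvD] at *
      rw [if_neg h1, if_neg h1]
      simp only [if_neg h2]

theorem aPrefix (l : List Int) (acc : Int) :
    (PySem.List.enumerate l).foldl pvAStepE ([], [], acc) = (pvEvens l, pvOdds l, pvF acc (pvCP l)) := by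
  induction l using List.reverseRecOn with
  | nil => simp [pvEvens, pvOdds, pvCP, pvF, PySem.List.enumerate]
  | append_singleton ys x ih =>
    rw [PySem.List.enumerate_append, List.foldl_append, ih,
        show PySem.List.enumerate [x] (0 + (ys.length : Int)) = [((ys.length : Int), x)] by
          rw [PySem.List.enumerate_cons]; simp [PySem.List.enumerate],
        List.foldl_cons, List.foldl_nil, pvAStepE_eq, pvCP_append, pvF_append, pvF_singleton]
    by_cases hx : PySem.Int.mod x 2 = 0
    · have hE : pvEvens (ys ++ [x]) = pvEvens ys ++ [x] := by
        simp only [pvEvens, List.filter_append, List.filter_cons, List.filter_nil, hx]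
        simp
      have hO : pvOdds (ys ++ [x]) = pvOdds ys := by
        simp only [pvOdds, List.filter_append, List.filter_cons, List.filter_nil, hx]
        simp
      rw [if_pos hx, hE, hO]
      simp only [pvBal, hE, hO, decide_eq_true_eq]
    · have hE : pvEvens (ys ++ [x]) = pvEvens ys := by
        simp only [pvEvens, List.filter_append, List.filter_cons, List.filter_nil, hx]
        simp
      have hO : pvOdds (ys ++ [x]) = pvOdds ys ++ [x] := by
        simp only [pvOdds, List.filter_append, List.filter_cons, List.filter_nil, hx]
        simp
      rw [if_neg hx, hE, hO]
      simp only [pvBal, hE, hO, decide_eq_true_eq]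

-- A's suffix loop
theorem pvASufE_eq (n : Int) (E O : List Int) (L j x : Int) :
    pvASufE n (E, O, L) (j, x) =
      if PySem.Int.mod x 2 = 0 then
        ((PySem.List.remove? E x).getD E, O,
          if pvD ((PySem.List.remove? E x).getD E) = pvD O then max L (n - j - 1) else L)
      else
        (E, (PySem.List.remove? O x).getD O,
          if pvD E = pvD ((PySem.List.remove? O x).getD O) then max L (n - j - 1) else L) := by
  by_cases h1 : PySem.Int.mod x 2 = 0
  · by_cases h2 : pvD ((PySem.List.remove? E x).getD E) = pvD O
    · simp only [pvASufE, pvD] at *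
      rw [if_pos h1, if_pos h1, if_pos h2]
      split_ifs with h3
      · rw [max_eq_right (le_of_lt h3)]
      · rw [max_eq_left (not_lt.1 h3)]
    · simp only [pvASufE, pvD] at *
      rw [if_pos h1, if_pos h1]
      simp only [if_neg h2]
  · by_cases h2 : pvD E = pvD ((PySem.List.remove? O x).getD O)
    · simp only [pvASufE, pvD] at *
      rw [if_neg h1, if_neg h1, if_pos h2]
      split_ifs with h3
      · rw [max_eq_right (le_of_lt h3)]
      · rw [max_eq_left (not_lt.1 h3)]
    · simp only [pvASufE, pvD] at *
      rw [if_neg h1, if_neg h1]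
      simp only [if_neg h2]

theorem aSuffix (n : Int) : ∀ (l E O : List Int) (acc s : Int),
    E.Perm (pvEvens l) → O.Perm (pvOdds l) → s + (l.length : Int) = n →
    ((PySem.List.enumerate l s).foldl (pvASufE n) (E, O, acc)).2.2 = pvF acc (pvCS l) := by
  intro l
  induction l with
  | nil => intro E O acc s _ _ _; simp [PySem.List.enumerate, pvCS, pvF]
  | cons x t ih =>
    intro E O acc s hE hO hs
    rw [PySem.List.enumerate_cons, List.foldl_cons, pvASufE_eq]
    have hcand : n - s - 1 = (t.length : Int) := by
      simp only [List.length_cons] at hs; push_cast at hs ⊢; omega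
    have hs' : (s + 1) + (t.length : Int) = n := by
      simp only [List.length_cons] at hs; push_cast at hs ⊢; omega
    by_cases hx : PySem.Int.mod x 2 = 0
    · have hdvd : (2 : Int) ∣ x := (PySem.Int.mod_eq_zero_iff_dvd x 2).1 hx
      have h1 : pvEvens (x :: t) = x :: pvEvens t := by simp [pvEvens, hdvd]
      have h2 : pvOdds (x :: t) = pvOdds t := by simp [pvOdds, hdvd]
      have hxE : x ∈ E := hE.mem_iff.2 (by rw [h1]; exact List.mem_cons_self)
      have hrem : PySem.List.remove? E x = some (E.erase x) :=
        PySem.List.remove?_eq_some_erase E x hxE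
      have hE' : (E.erase x).Perm (pvEvens t) := by
        have h3 := List.Perm.erase x hE
        rwa [h1, List.erase_cons_head] at h3
      have hO' : O.Perm (pvOdds t) := by rwa [h2] at hO
      rw [if_pos hx, hrem]
      simp only [Option.getD_some]
      simp only [pvD_perm hE', pvD_perm hO', hcand]
      have := ih (E.erase x) O
        (if pvD (pvEvens t) = pvD (pvOdds t) then max acc (t.length : Int) else acc)
        (s + 1) hE' hO' hs'
      rw [this]
      have hacc : (if pvD (pvEvens t) = pvD (pvOdds t) then max acc (t.length : Int) else acc)
          = (if pvBal t then max acc (t.length : Int) else acc) := by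
        simp [pvBal]
      rw [hacc]
      rfl
    · have hndvd : ¬ (2 : Int) ∣ x := fun h => hx ((PySem.Int.mod_eq_zero_iff_dvd x 2).2 h)
      have h1 : pvOdds (x :: t) = x :: pvOdds t := by simp [pvOdds, hndvd]
      have h2 : pvEvens (x :: t) = pvEvens t := by simp [pvEvens, hndvd]
      have hxO : x ∈ O := hO.mem_iff.2 (by rw [h1]; exact List.mem_cons_self)
      have hrem : PySem.List.remove? O x = some (O.erase x) :=
        PySem.List.remove?_eq_some_erase O x hxO
      have hO' : (O.erase x).Perm (pvOdds t) := by
        have h3 := List.Perm.erase x hO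
        rwa [h1, List.erase_cons_head] at h3
      have hE' : E.Perm (pvEvens t) := by rwa [h2] at hE
      rw [if_neg hx, hrem]
      simp only [Option.getD_some]
      simp only [pvD_perm hE', pvD_perm hO', hcand]
      have := ih E (O.erase x)
        (if pvD (pvEvens t) = pvD (pvOdds t) then max acc (t.length : Int) else acc)
        (s + 1) hE' hO' hs'
      rw [this]
      have hacc : (if pvD (pvEvens t) = pvD (pvOdds t) then max acc (t.length : Int) else acc)
          = (if pvBal t then max acc (t.length : Int) else acc) := by
        simp [pvBal]
      rw [hacc]
      rfl

-- B's loop (used for both passes)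
theorem pv_count_zero (ce : PySem.Dict Int Int) (l : List Int) (x : Int)
    (h : ce.getD x 0 = ((l.count x : Nat) : Int)) : (ce.getD x 0 = 0) ↔ x ∉ l := by
  rw [h]
  rw [show (((l.count x : Nat) : Int) = 0) ↔ (l.count x = 0) from Int.natCast_eq_zero]
  exact List.count_eq_zero

theorem bPass (l : List Int) (acc : Int) :
    ∃ ce co : PySem.Dict Int Int,
      (PySem.List.enumerate l).foldl pvBStep ((PySem.Dict.empty, PySem.Dict.empty, 0, 0), acc)
        = ((ce, co, pvD (pvEvens l), pvD (pvOdds l)), pvF acc (pvCP l)) ∧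
      (∀ x, ce.getD x 0 = ((pvEvens l).count x : Int)) ∧
      (∀ x, co.getD x 0 = ((pvOdds l).count x : Int)) := by
  induction l using List.reverseRecOn with
  | nil =>
    refine ⟨PySem.Dict.empty, PySem.Dict.empty, ?_, ?_, ?_⟩
    · simp [pvEvens, pvOdds, pvD, pvCP, pvF, PySem.List.enumerate, PySem.Set.len]
    · intro x; simp [pvEvens, PySem.Dict.getD, PySem.Dict.get?, PySem.Dict.empty]
    · intro x; simp [pvOdds, PySem.Dict.getD, PySem.Dict.get?, PySem.Dict.empty]
  | append_singleton ys x ih =>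
    obtain ⟨ce, co, hstate, hce, hco⟩ := ih
    rw [PySem.List.enumerate_append, List.foldl_append, hstate,
        show PySem.List.enumerate [x] (0 + (ys.length : Int)) = [((ys.length : Int), x)] by
          rw [PySem.List.enumerate_cons]; simp [PySem.List.enumerate],
        List.foldl_cons, List.foldl_nil, pvCP_append, pvF_append, pvF_singleton]
    set L := pvF acc (pvCP ys) with hL
    set i : Int := (ys.length : Int) with hi
    by_cases hx : PySem.Int.mod x 2 = 0
    · have hdvd : (2 : Int) ∣ x := (PySem.Int.mod_eq_zero_iff_dvd x 2).1 hx
      have hE : pvEvens (ys ++ [x]) = pvEvens ys ++ [x] := by simp [pvEvens, hdvd]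
      have hO : pvOdds (ys ++ [x]) = pvOdds ys := by simp [pvOdds, hdvd]
      have hde' : (if ce.getD x 0 = 0 then pvD (pvEvens ys) + 1 else pvD (pvEvens ys))
          = pvD (pvEvens (ys ++ [x])) := by
        rw [hE, pvD_append]
        by_cases hm : x ∈ pvEvens ys
        · rw [if_neg (by rw [pv_count_zero ce _ x (hce x)]; simp [hm]), if_pos hm]
        · rw [if_pos (by rw [pv_count_zero ce _ x (hce x)]; simp [hm]), if_neg hm]
      refine ⟨ce.insert x (ce.getD x 0 + 1), co, ?_, ?_, ?_⟩
      · show pvBStep ((ce, co, pvD (pvEvens ys), pvD (pvOdds ys)), L) (i, x) = _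
        simp only [pvBStep, pvAdd]
        rw [if_pos hx]
        simp only [hde', hO]
        by_cases hb : pvD (pvEvens (ys ++ [x])) = pvD (pvOdds ys)
        · have hbal : pvBal (ys ++ [x]) = true := by
            rw [pvBal, hE, hO]; rw [hE] at hb; exact decide_eq_true hb
          rw [hbal]
          by_cases hlv : L < i + 1
          · rw [if_pos ⟨hb, hlv⟩, if_pos rfl, max_eq_right (le_of_lt hlv)]
          · rw [if_neg (by tauto), if_pos rfl, max_eq_left (not_lt.1 hlv)]
        · have hbal : pvBal (ys ++ [x]) = false := by
            rw [pvBal, hE, hO]; rw [hE] at hb; exact decide_eq_false hb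
          rw [hbal, if_neg (by tauto), if_neg (by simp)]
      · intro y
        rw [PySem.Dict.getD_insert, hE]
        by_cases hy : y = x
        · subst hy
          rw [if_pos rfl, hce y, List.count_append]
          simp
        · rw [if_neg hy, hce y, List.count_append,
              List.count_eq_zero.2 (show y ∉ [x] by simp [hy])]
          simp
      · intro y
        rw [hO]
        exact hco y
    · have hndvd : ¬ (2 : Int) ∣ x := fun h => hx ((PySem.Int.mod_eq_zero_iff_dvd x 2).2 h)
      have hE : pvEvens (ys ++ [x]) = pvEvens ys := by simp [pvEvens, hndvd]
      have hO : pvOdds (ys ++ [x]) = pvOdds ys ++ [x] := by simp [pvOdds, hndvd]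
      have hdo' : (if co.getD x 0 = 0 then pvD (pvOdds ys) + 1 else pvD (pvOdds ys))
          = pvD (pvOdds (ys ++ [x])) := by
        rw [hO, pvD_append]
        by_cases hm : x ∈ pvOdds ys
        · rw [if_neg (by rw [pv_count_zero co _ x (hco x)]; simp [hm]), if_pos hm]
        · rw [if_pos (by rw [pv_count_zero co _ x (hco x)]; simp [hm]), if_neg hm]
      refine ⟨ce, co.insert x (co.getD x 0 + 1), ?_, ?_, ?_⟩
      · show pvBStep ((ce, co, pvD (pvEvens ys), pvD (pvOdds ys)), L) (i, x) = _
        simp only [pvBStep, pvAdd]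
        rw [if_neg hx]
        simp only [hdo', hE]
        by_cases hb : pvD (pvEvens ys) = pvD (pvOdds (ys ++ [x]))
        · have hbal : pvBal (ys ++ [x]) = true := by
            rw [pvBal, hE, hO]; rw [hO] at hb; exact decide_eq_true hb
          rw [hbal]
          by_cases hlv : L < i + 1
          · rw [if_pos ⟨hb, hlv⟩, if_pos rfl, max_eq_right (le_of_lt hlv)]
          · rw [if_neg (by tauto), if_pos rfl, max_eq_left (not_lt.1 hlv)]
        · have hbal : pvBal (ys ++ [x]) = false := by
            rw [pvBal, hE, hO]; rw [hO] at hb; exact decide_eq_false hb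
          rw [hbal, if_neg (by tauto), if_neg (by simp)]
      · intro y
        rw [hE]
        exact hce y
      · intro y
        rw [PySem.Dict.getD_insert, hO]
        by_cases hy : y = x
        · subst hy
          rw [if_pos rfl, hco y, List.count_append]
          simp
        · rw [if_neg hy, hco y, List.count_append,
              List.count_eq_zero.2 (show y ∉ [x] by simp [hy])]
          simp

-- ===== VERDICT (by name: the statement is the Claim_ definition above) =====
theorem pvA_bridge (nums : List Int) :
    wrongLongestBalanced nums =
      (if ((PySem.List.enumerate nums).foldl pvAStepE ([], [], 0)).2.2 = (nums.length : Int)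
       then (nums.length : Int)
       else ((PySem.List.enumerate nums).foldl (pvASufE (nums.length : Int))
              ((PySem.List.enumerate nums).foldl pvAStepE ([], [], 0))).2.2) := by
  rw [PySem.List.enumerate_eq_map_pyRange nums 0, List.foldl_map, List.foldl_map]
  rfl

theorem pvB_bridge (nums : List Int) :
    wrongLongestBalanced_alt nums =
      ((PySem.List.enumerate nums.reverse).foldl pvBStep
        ((PySem.Dict.empty, PySem.Dict.empty, 0, 0),
          ((PySem.List.enumerate nums).foldl pvBStep
            ((PySem.Dict.empty, PySem.Dict.empty, 0, 0), 0)).2)).2 := rfl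

theorem wrongLongestBalanced_spec : Claim_equal_wrongLongestBalanced := by
  intro nums _
  show wrongLongestBalanced nums = wrongLongestBalanced_alt nums
  set n : Int := (nums.length : Int) with hn
  set L1 : Int := pvF 0 (pvCP nums) with hL1
  set S : Int := pvF L1 (pvCS nums) with hS
  -- A's value
  have hA : wrongLongestBalanced nums = (if L1 = n then n else S) := by
    rw [pvA_bridge, aPrefix nums 0]
    by_cases hL : L1 = n
    · rw [if_pos hL, if_pos hL]
    · rw [if_neg hL, if_neg hL,
          aSuffix n nums (pvEvens nums) (pvOdds nums) L1 0 (List.Perm.refl _) (List.Perm.refl _)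
            (by rw [hn]; ring)]
  -- B's value
  have hB : wrongLongestBalanced_alt nums = (if pvBal nums then max S n else S) := by
    rw [pvB_bridge]
    obtain ⟨ce1, co1, h1, -, -⟩ := bPass nums 0
    rw [h1]
    obtain ⟨ce2, co2, h2, -, -⟩ := bPass nums.reverse L1
    rw [h2]
    have hrl : ((nums.reverse.length : Nat) : Int) = n := by simp [hn]
    rw [show pvF L1 (pvCP nums.reverse)
          = pvF L1 (pvCS nums ++ [(pvBal nums, (nums.length : Int))]) from
        (pvSuffix_eq nums L1 (pvF_mono 0 _)).symm,
        pvF_append, pvF_singleton]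
  have h0n : (0 : Int) ≤ n := by rw [hn]; exact_mod_cast Nat.zero_le _
  have hSle : ∀ c ∈ pvCS nums, c.1 = true → c.2 ≤ n := fun c hc hct => pvCS_val_le nums c hc hct
  rw [hA, hB]
  by_cases hL : L1 = n
  · rw [if_pos hL]
    have hSge : n ≤ S := by rw [hS, ← hL]; exact pvF_mono L1 _
    have hSle' : S ≤ n := pvF_ub (le_of_eq hL) hSle
    rw [le_antisymm hSle' hSge]
    split <;> simp
  · rw [if_neg hL]
    by_cases hb : pvBal nums = true
    · exfalso
      apply hL
      have hne : nums ≠ [] := by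
        rintro rfl
        exact hL (by rw [hL1, hn]; rfl)
      have hlen : 1 ≤ nums.length := by
        cases nums with
        | nil => exact absurd rfl hne
        | cons a t => simp
      have hmem : (true, n) ∈ pvCP nums := by
        unfold pvCP
        rw [List.mem_map]
        refine ⟨nums.length - 1, List.mem_range.2 (by omega), ?_⟩
        rw [show nums.length - 1 + 1 = nums.length from by omega, List.take_of_length_le le_rfl, hb]
        rw [Prod.mk.injEq]
        refine ⟨rfl, ?_⟩
        rw [hn]
        omega
      have hge : n ≤ L1 := pvF_mem_le hmem
      have hle : L1 ≤ n := pvF_ub h0n (pvCP_val_le nums)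
      exact le_antisymm hle hge
    · rw [if_neg hb]
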